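-- pv_equiv track=rewrite | github.com/buscagliad/adventofcode | 2015/day24/weights.py | quan
-- ===== SOURCE A (Python) =====
-- weights = [1,3,5,11,13,17,19,23,29,31,37,41,43,47,53,59,67,71,73,79,83,89,97,101,103,107,109,113]
--
-- lw = len(weights)
--
-- def quan(avg, part2 = False):
--     prod = 1000000000000
--     for i1 in range(lw-1,-1,-1):
--         s1 = weights[i1]
--         p1 = weights[i1]
--         for i2 in range(i1-1,-1,-1):
--             s2 = s1 + weights[i2]
--             p2 = p1 * weights[i2]
--             for i3 in range(i2-1,-1,-1):
--                 s3 = s2 + weights[i3]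
--                 p3 = p2 * weights[i3]
--                 for i4 in range(i3-1,-1,-1):
--                     s4 = s3 + weights[i4]
--                     p4 = p3 * weights[i4]
--                     for i5 in range(i4-1,-1,-1):
--                         s5 = s4 + weights[i5]
--                         p5 = p4 * weights[i5]
--                         if (part2):
--                             if s5 < avg: break
--                             if s5 == avg:
--                                if p5 < prod:
--                                     prod = p5
--                         for i6 in range(i5-1,-1,-1):
--                             s6 = s5 + weights[i6]
--                             if s6 < avg: break
--                             p6 = p5 * weights[i6]
--                             if s6 == avg:
--                                 if p6 < prod:
--                                     prod = p6
--     return prod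
-- ===== SOURCE B (Python) =====
-- weights = [1,3,5,11,13,17,19,23,29,31,37,41,43,47,53,59,67,71,73,79,83,89,97,101,103,107,109,113]
--
-- def quan(avg, part2 = False):
--     # DP over (count, sum) -> minimum product, one dict of sums per count.
--     k = 5 if part2 else 6
--     best = [{0: 1}] + [{} for _ in range(k)]
--     for wt in weights:
--         nxt = [best[0]]
--         for c in range(1, k + 1):
--             d = dict(best[c])
--             for s, p in best[c - 1].items():
--                 q = p * wt
--                 t = d.get(s + wt)
--                 if t is None or q < t:
--                     d[s + wt] = q
--             nxt.append(d)
--         best = nxt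
--     p = best[k].get(avg)
--     if p is not None and p < 10**12:
--         return p
--     return 10**12
-- ===== Notes on version B (the rewrite author's own statement) =====
-- stated objective: faster
-- what changed: Replaces the six nested descending index loops (enumerating every chain of up to 6 weights) with a knapsack DP over (count, sum) -> minimum product per count, then one lookup at (k, avg).
import Mathlib
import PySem

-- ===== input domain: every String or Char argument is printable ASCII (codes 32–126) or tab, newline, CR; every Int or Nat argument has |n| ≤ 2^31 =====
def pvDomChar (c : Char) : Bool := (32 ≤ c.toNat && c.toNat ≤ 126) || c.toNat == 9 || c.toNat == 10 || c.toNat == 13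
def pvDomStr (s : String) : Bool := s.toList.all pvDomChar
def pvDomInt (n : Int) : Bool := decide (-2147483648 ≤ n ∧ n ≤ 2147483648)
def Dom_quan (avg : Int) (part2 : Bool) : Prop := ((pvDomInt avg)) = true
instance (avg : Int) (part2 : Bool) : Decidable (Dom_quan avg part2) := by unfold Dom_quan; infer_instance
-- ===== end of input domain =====

-- B replaces A's six nested index loops (enumerating every descending chain of up to 6 weights)
-- with a knapsack DP over (count, sum) -> minimum product; a timing run measures the speed claim.


-- the module-level constant `weights`
def pvWeights : List Int :=
  [1, 3, 5, 11, 13, 17, 19, 23, 29, 31, 37, 41, 43, 47, 53, 59, 67, 71, 73, 79, 83, 89, 97, 101, 103, 107, 109, 113]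

-- ===== PORT A =====
-- `weights[i]`: every index A uses comes from `range(…, -1, -1)` below an in-range start,
-- so plain getD is exact here (no IndexError is reachable).
def wA (i : Nat) : Int := pvWeights.getD i 0

-- each Python `for iK in range(prev-1, -1, -1)` loop becomes a Nat recursion whose fuel n
-- means "indices n-1, n-2, …, 0 remain"; `break` returns the accumulated prod.
def loop6A (avg s5 p5 : Int) : Nat → Int → Int
  | 0, prod => prod
  | Nat.succ n, prod =>
    let s6 := s5 + wA n
    if s6 < avg then prod
    else
      let p6 := p5 * wA n
      loop6A avg s5 p5 n (if s6 = avg then (if p6 < prod then p6 else prod) else prod)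

def loop5A (avg : Int) (part2 : Bool) (s4 p4 : Int) : Nat → Int → Int
  | 0, prod => prod
  | Nat.succ n, prod =>
    let s5 := s4 + wA n
    let p5 := p4 * wA n
    if part2 ∧ s5 < avg then prod
    else
      let prod1 := if part2 ∧ s5 = avg then (if p5 < prod then p5 else prod) else prod
      loop5A avg part2 s4 p4 n (loop6A avg s5 p5 n prod1)

def loop4A (avg : Int) (part2 : Bool) (s3 p3 : Int) : Nat → Int → Int
  | 0, prod => prod
  | Nat.succ n, prod => loop4A avg part2 s3 p3 n (loop5A avg part2 (s3 + wA n) (p3 * wA n) n prod)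

def loop3A (avg : Int) (part2 : Bool) (s2 p2 : Int) : Nat → Int → Int
  | 0, prod => prod
  | Nat.succ n, prod => loop3A avg part2 s2 p2 n (loop4A avg part2 (s2 + wA n) (p2 * wA n) n prod)

def loop2A (avg : Int) (part2 : Bool) (s1 p1 : Int) : Nat → Int → Int
  | 0, prod => prod
  | Nat.succ n, prod => loop2A avg part2 s1 p1 n (loop3A avg part2 (s1 + wA n) (p1 * wA n) n prod)

def loop1A (avg : Int) (part2 : Bool) : Nat → Int → Int
  | 0, prod => prod
  | Nat.succ n, prod => loop1A avg part2 n (loop2A avg part2 (wA n) (wA n) n prod)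

def quan (avg : Int) (part2 : Bool) : Int :=
  loop1A avg part2 pvWeights.length 1000000000000

-- ===== PORT B =====
-- `for s, p in best[c-1].items(): q = p*wt; t = d.get(s+wt); if t is None or q < t: d[s+wt] = q`
def stepB (wt : Int) (dprev d0 : PySem.Dict Int Int) : PySem.Dict Int Int :=
  dprev.items.foldl (fun d sp =>
    let q := sp.2 * wt
    match d.get? (sp.1 + wt) with
    | none => d.insert (sp.1 + wt) q
    | some t => if q < t then d.insert (sp.1 + wt) q else d) d0

-- `nxt = [best[0]]; for c in range(1, k+1): … nxt.append(d)`; list indices are in range,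
-- so pyGetD with a default is exact (no IndexError is reachable).
def stepW (k : Nat) (wt : Int) (best : List (PySem.Dict Int Int)) : List (PySem.Dict Int Int) :=
  (PySem.List.pyRange 1 ((k : Int) + 1) 1).foldl
    (fun nxt c =>
      nxt ++ [stepB wt (PySem.List.pyGetD best (c - 1) PySem.Dict.empty)
                       (PySem.List.pyGetD best c PySem.Dict.empty)])
    [PySem.List.pyGetD best 0 PySem.Dict.empty]

def quan_alt (avg : Int) (part2 : Bool) : Int :=
  let k : Nat := if part2 then 5 else 6
  let best0 : List (PySem.Dict Int Int) :=
    (PySem.Dict.empty.insert 0 1) :: List.replicate k PySem.Dict.empty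
  let best := pvWeights.foldl (fun b wt => stepW k wt b) best0
  match (PySem.List.pyGetD best (k : Int) PySem.Dict.empty).get? avg with
  | some p => if p < 1000000000000 then p else 1000000000000
  | none => 1000000000000

-- ===== PRECONDITION & SPEC =====
def Spec_quan (avg : Int) (part2 : Bool) (out : Int) : Prop := out = quan_alt avg part2
instance (avg : Int) (part2 : Bool) (out : Int) : Decidable (Spec_quan avg part2 out) := by unfold Spec_quan; infer_instance

-- ===== CLAIM (what is proved, stated in full; the proofs are below) =====
def Claim_equal_quan : Prop := ∀ (avg : Int) (part2 : Bool), Dom_quan avg part2 → Spec_quan avg part2 (quan avg part2)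

-- ===== LEMMAS AND PROOFS =====

-- `omin`: minimum of two optional values (none = no candidate).
def omin : Option Int → Option Int → Option Int
  | none, b => b
  | some a, none => some a
  | some a, some b => some (min a b)

-- `mp ws c s` = minimum product over the c-element sub-multisets of ws summing to s
-- (none if there is no such subset); the common functional specification of both programs.
def mp : List Int → Nat → Int → Option Int
  | [], c, s => if c = 0 ∧ s = 0 then some 1 else none
  | _ :: ws, 0, s => mp ws 0 s
  | wt :: ws, Nat.succ c, s => omin (mp ws (c + 1) s) ((mp ws c (s - wt)).map (· * wt))

-- `mix o prod` = fold one optional candidate into the running minimum, with A's strict `<`.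
def mix : Option Int → Int → Int
  | none, prod => prod
  | some v, prod => if v < prod then v else prod

-- the weights with indices below n, most recently seen (largest index) first
def revA (n : Nat) : List Int := ((List.range n).map wA).reverse

theorem revA_succ (n : Nat) : revA (n + 1) = wA n :: revA n := by
  simp [revA, List.range_succ]

theorem mem_revA (x : Int) (n : Nat) : x ∈ revA n ↔ ∃ j, j < n ∧ wA j = x := by
  simp [revA]

theorem wA_pos {j : Nat} (h : j < 28) : 0 < wA j := by
  have : ∀ j ∈ List.range 28, 0 < wA j := by decide
  exact this j (List.mem_range.mpr h)

theorem wA_mono {j n : Nat} (h1 : j ≤ n) (h2 : n < 28) : wA j ≤ wA n := by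
  have : ∀ j ∈ List.range 28, ∀ n ∈ List.range 28, j ≤ n → wA j ≤ wA n := by decide
  exact this j (List.mem_range.mpr (lt_of_le_of_lt h1 h2)) n (List.mem_range.mpr h2) h1

theorem mp_zero (ws : List Int) (s : Int) : mp ws 0 s = if s = 0 then some 1 else none := by
  induction ws with
  | nil => simp [mp]
  | cons w ws ih => simpa [mp] using ih

theorem mp_one (ws : List Int) (t : Int) : mp ws 1 t = if t ∈ ws then some t else none := by
  induction ws with
  | nil => simp [mp]
  | cons w ws ih =>
    show omin (mp ws 1 t) ((mp ws 0 (t - w)).map (· * w)) = _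
    rw [ih, mp_zero]
    by_cases hw : t = w
    · subst hw
      by_cases hm : t ∈ ws <;> simp [hm, omin]
    · have : ¬ (t - w = 0) := by omega
      by_cases hm : t ∈ ws <;> simp [hm, hw, this, omin]

theorem mix_some (v prod : Int) : mix (some v) prod = min v prod := by
  simp [mix, min_def]
  omega

theorem mul_min_pos {p : Int} (hp : 0 < p) (a b : Int) : p * min a b = min (p * a) (p * b) := by
  rcases le_total a b with h | h <;>
    simp [min_def, h, mul_le_mul_of_nonneg_left h hp.le] <;> intro h2 <;> nlinarith [mul_le_mul_of_nonneg_left h hp.le]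

theorem mix_omin_map {p : Int} (hp : 0 < p) (a b : Option Int) (prod : Int) :
    mix ((omin a b).map (fun q => p * q)) prod
      = mix (a.map (fun q => p * q)) (mix (b.map (fun q => p * q)) prod) := by
  cases a with
  | none => simp [omin, mix]
  | some x =>
    cases b with
    | none => simp [omin, mix]
    | some y =>
      simp only [omin, Option.map_some, mix_some, mul_min_pos hp]
      rw [min_assoc]

theorem map_mul_shift (o : Option Int) (p w : Int) :
    ((o.map (· * w)).map (fun q => p * q)) = o.map (fun q => (p * w) * q) := by
  cases o with
  | none => rfl
  | some x => simp; ring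

-- A's innermost loop (over i6) computes the 1-element-extension minimum.
theorem L6 (avg : Int) : ∀ n, n ≤ 28 → ∀ s p prod, 0 < p →
    loop6A avg s p n prod = mix ((mp (revA n) 1 (avg - s)).map (fun q => p * q)) prod := by
  intro n
  induction n with
  | zero => intro _ s p prod _; simp [loop6A, revA, mp, mix]
  | succ n ih =>
    intro hn s p prod hp
    have hn' : n < 28 := hn
    rw [revA_succ]
    by_cases hb : s + wA n < avg
    · -- break: no later index can reach the target sum either
      have hnot : (avg - s) ∉ (wA n :: revA n) := by
        intro hmem
        rcases List.mem_cons.mp hmem with h | h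
        · omega
        · rcases (mem_revA _ _).mp h with ⟨j, hj, hje⟩
          have := wA_mono (Nat.le_of_lt hj) hn'
          omega
      rw [mp_one]
      simp [hnot, mix, loop6A, hb]
    · -- no break: process index n, then induct
      have hstep : loop6A avg s p (n + 1) prod
          = loop6A avg s p n (if s + wA n = avg then (if p * wA n < prod then p * wA n else prod) else prod) := by
        simp [loop6A, hb]
      rw [hstep, ih (by omega) s p _ hp]
      show _ = mix ((omin (mp (revA n) 1 (avg - s)) ((mp (revA n) 0 (avg - s - wA n)).map (· * wA n))).map
        (fun q => p * q)) prod
      rw [mp_zero]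
      by_cases he : s + wA n = avg
      · have h0 : avg - s - wA n = 0 := by omega
        simp only [h0, if_pos rfl, Option.map_some, one_mul]
        rw [mix_omin_map hp]
        simp [mix, he]
      · have h0 : ¬ (avg - s - wA n = 0) := by omega
        simp only [h0, if_neg, if_false, Option.map_none]
        rw [mix_omin_map hp]
        simp [mix, he]

-- once the partial sum has reached avg, the i6 loop can change nothing (weights are positive)
theorem loop6A_noop (avg : Int) : ∀ n, n ≤ 28 → ∀ s p prod, avg ≤ s →
    loop6A avg s p n prod = prod := by
  intro n
  induction n with
  | zero => intro _ s p prod _; simp [loop6A]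
  | succ n ih =>
    intro hn s p prod hs
    have hw := wA_pos (j := n) hn
    have h1 : ¬ (s + wA n < avg) := by omega
    have h2 : ¬ (s + wA n = avg) := by omega
    simp only [loop6A, h1, if_neg, if_false, h2]
    exact ih (by omega) s p prod hs

-- with part2 the i5 loop is exactly the 1-element-extension minimum:
-- executed i6 sub-loops start at a sum ≥ avg and are no-ops, and `break` only skips sums < avg.
theorem L5T (avg : Int) : ∀ n, n ≤ 28 → ∀ s p prod, 0 < p →
    loop5A avg true s p n prod = mix ((mp (revA n) 1 (avg - s)).map (fun q => p * q)) prod := by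
  intro n
  induction n with
  | zero => intro _ s p prod _; simp [loop5A, revA, mp, mix]
  | succ n ih =>
    intro hn s p prod hp
    have hn' : n < 28 := hn
    rw [revA_succ]
    by_cases hb : s + wA n < avg
    · have hnot : (avg - s) ∉ (wA n :: revA n) := by
        intro hmem
        rcases List.mem_cons.mp hmem with h | h
        · omega
        · rcases (mem_revA _ _).mp h with ⟨j, hj, hje⟩
          have := wA_mono (Nat.le_of_lt hj) hn'
          omega
      rw [mp_one]
      simp [hnot, mix, loop5A, hb]
    · have hge : avg ≤ s + wA n := by omega
      have hstep : loop5A avg true s p (n + 1) prod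
          = loop5A avg true s p n
              (loop6A avg (s + wA n) (p * wA n) n
                (if s + wA n = avg then (if p * wA n < prod then p * wA n else prod) else prod)) := by
        simp [loop5A, hb]
      rw [hstep, loop6A_noop avg n (by omega) _ _ _ hge, ih (by omega) s p _ hp]
      show _ = mix ((omin (mp (revA n) 1 (avg - s)) ((mp (revA n) 0 (avg - s - wA n)).map (· * wA n))).map
        (fun q => p * q)) prod
      rw [mp_zero]
      by_cases he : s + wA n = avg
      · have h0 : avg - s - wA n = 0 := by omega
        simp only [h0, if_pos rfl, Option.map_some, one_mul]
        rw [mix_omin_map hp]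
        simp [mix, he]
      · have h0 : ¬ (avg - s - wA n = 0) := by omega
        simp only [h0, if_neg, if_false, Option.map_none]
        rw [mix_omin_map hp]
        simp [mix, he]

-- one step up the nest: a loop whose body feeds `inner` at (s + w n, p * w n) computes the
-- (c+2)-element-extension minimum, given inner computes the (c+1)-element one.
theorem outerLem (avg : Int) (c : Nat) (inner : Int → Int → Nat → Int → Int)
    (Hinner : ∀ s p n prod, n ≤ 28 → 0 < p →
      inner s p n prod = mix ((mp (revA n) (c + 1) (avg - s)).map (fun q => p * q)) prod)
    (s p : Int) (hp : 0 < p) (loopF : Nat → Int → Int)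
    (h0 : ∀ prod, loopF 0 prod = prod)
    (hS : ∀ n prod, loopF (n + 1) prod = loopF n (inner (s + wA n) (p * wA n) n prod)) :
    ∀ n, n ≤ 28 → ∀ prod, loopF n prod = mix ((mp (revA n) (c + 2) (avg - s)).map (fun q => p * q)) prod := by
  intro n
  induction n with
  | zero => intro _ prod; simp [h0, revA, mp, mix]
  | succ n ih =>
    intro hn prod
    have hn' : n < 28 := hn
    have hpw : 0 < p * wA n := mul_pos hp (wA_pos hn')
    rw [hS, Hinner _ _ _ _ (by omega) hpw, ih (by omega), revA_succ]
    show _ = mix ((omin (mp (revA n) (c + 2) (avg - s)) ((mp (revA n) (c + 1) ((avg - s) - wA n)).map (· * wA n))).map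
      (fun q => p * q)) prod
    rw [mix_omin_map hp, map_mul_shift]
    have : avg - (s + wA n) = avg - s - wA n := by ring
    rw [this]

theorem L5F (avg : Int) : ∀ s p, 0 < p → ∀ n, n ≤ 28 → ∀ prod,
    loop5A avg false s p n prod = mix ((mp (revA n) 2 (avg - s)).map (fun q => p * q)) prod := by
  intro s p hp
  exact outerLem avg 0 (loop6A avg)
    (fun s p n prod hn hp => L6 avg n hn s p prod hp) s p hp
    (loop5A avg false s p) (fun prod => by simp [loop5A])
    (fun n prod => by simp [loop5A])

theorem L4F (avg : Int) : ∀ s p, 0 < p → ∀ n, n ≤ 28 → ∀ prod,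
    loop4A avg false s p n prod = mix ((mp (revA n) 3 (avg - s)).map (fun q => p * q)) prod := by
  intro s p hp
  exact outerLem avg 1 (fun s p n prod => loop5A avg false s p n prod)
    (fun s p n prod hn hp => L5F avg s p hp n hn prod) s p hp
    (loop4A avg false s p) (fun prod => by simp [loop4A])
    (fun n prod => by simp [loop4A])

theorem L3F (avg : Int) : ∀ s p, 0 < p → ∀ n, n ≤ 28 → ∀ prod,
    loop3A avg false s p n prod = mix ((mp (revA n) 4 (avg - s)).map (fun q => p * q)) prod := by
  intro s p hp
  exact outerLem avg 2 (fun s p n prod => loop4A avg false s p n prod)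
    (fun s p n prod hn hp => L4F avg s p hp n hn prod) s p hp
    (loop3A avg false s p) (fun prod => by simp [loop3A])
    (fun n prod => by simp [loop3A])

theorem L2F (avg : Int) : ∀ s p, 0 < p → ∀ n, n ≤ 28 → ∀ prod,
    loop2A avg false s p n prod = mix ((mp (revA n) 5 (avg - s)).map (fun q => p * q)) prod := by
  intro s p hp
  exact outerLem avg 3 (fun s p n prod => loop3A avg false s p n prod)
    (fun s p n prod hn hp => L3F avg s p hp n hn prod) s p hp
    (loop2A avg false s p) (fun prod => by simp [loop2A])
    (fun n prod => by simp [loop2A])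

theorem L1F (avg : Int) : ∀ n, n ≤ 28 → ∀ prod,
    loop1A avg false n prod = mix ((mp (revA n) 6 (avg - 0)).map (fun q => (1:Int) * q)) prod := by
  exact outerLem avg 4 (fun s p n prod => loop2A avg false s p n prod)
    (fun s p n prod hn hp => L2F avg s p hp n hn prod) 0 1 one_pos
    (loop1A avg false) (fun prod => by simp [loop1A])
    (fun n prod => by simp [loop1A])

theorem L4T (avg : Int) : ∀ s p, 0 < p → ∀ n, n ≤ 28 → ∀ prod,
    loop4A avg true s p n prod = mix ((mp (revA n) 2 (avg - s)).map (fun q => p * q)) prod := by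
  intro s p hp
  exact outerLem avg 0 (fun s p n prod => loop5A avg true s p n prod)
    (fun s p n prod hn hp => L5T avg n hn s p prod hp) s p hp
    (loop4A avg true s p) (fun prod => by simp [loop4A])
    (fun n prod => by simp [loop4A])

theorem L3T (avg : Int) : ∀ s p, 0 < p → ∀ n, n ≤ 28 → ∀ prod,
    loop3A avg true s p n prod = mix ((mp (revA n) 3 (avg - s)).map (fun q => p * q)) prod := by
  intro s p hp
  exact outerLem avg 1 (fun s p n prod => loop4A avg true s p n prod)
    (fun s p n prod hn hp => L4T avg s p hp n hn prod) s p hp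
    (loop3A avg true s p) (fun prod => by simp [loop3A])
    (fun n prod => by simp [loop3A])

theorem L2T (avg : Int) : ∀ s p, 0 < p → ∀ n, n ≤ 28 → ∀ prod,
    loop2A avg true s p n prod = mix ((mp (revA n) 4 (avg - s)).map (fun q => p * q)) prod := by
  intro s p hp
  exact outerLem avg 2 (fun s p n prod => loop3A avg true s p n prod)
    (fun s p n prod hn hp => L3T avg s p hp n hn prod) s p hp
    (loop2A avg true s p) (fun prod => by simp [loop2A])
    (fun n prod => by simp [loop2A])

theorem L1T (avg : Int) : ∀ n, n ≤ 28 → ∀ prod,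
    loop1A avg true n prod = mix ((mp (revA n) 5 (avg - 0)).map (fun q => (1:Int) * q)) prod := by
  exact outerLem avg 3 (fun s p n prod => loop2A avg true s p n prod)
    (fun s p n prod hn hp => L2T avg s p hp n hn prod) 0 1 one_pos
    (loop1A avg true) (fun prod => by simp [loop1A])
    (fun n prod => by simp [loop1A])

theorem revA_28 : revA 28 = pvWeights.reverse := by
  have : (List.range 28).map wA = pvWeights := by decide
  rw [revA, this]

theorem quan_eq_mix (avg : Int) (part2 : Bool) :
    quan avg part2 = mix (mp pvWeights.reverse (if part2 then 5 else 6) avg) 1000000000000 := by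
  have hmap : ∀ o : Option Int, o.map (fun q => (1:Int) * q) = o := by
    intro o; cases o <;> simp
  have hlen : pvWeights.length = 28 := by decide
  cases part2 with
  | false =>
    show loop1A avg false pvWeights.length 1000000000000 = _
    rw [hlen, L1F avg 28 (le_refl 28), revA_28, hmap]
    norm_num
  | true =>
    show loop1A avg true pvWeights.length 1000000000000 = _
    rw [hlen, L1T avg 28 (le_refl 28), revA_28, hmap]
    norm_num

-- ---------- B side ----------

theorem foldB_upd_get? (wt : Int) : ∀ (l : List (Int × Int)) (d : PySem.Dict Int Int),
    (l.map Prod.fst).Nodup → ∀ s : Int,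
    (l.foldl (fun d sp =>
        let q := sp.2 * wt
        match d.get? (sp.1 + wt) with
        | none => d.insert (sp.1 + wt) q
        | some t => if q < t then d.insert (sp.1 + wt) q else d) d).get? s
      = match l.find? (fun sp => sp.1 + wt == s) with
        | some sp => omin (d.get? s) (some (sp.2 * wt))
        | none => d.get? s := by
  intro l
  induction l with
  | nil => intro d _ s; simp
  | cons a l ih =>
    intro d hnd s
    have hnd' : (l.map Prod.fst).Nodup := (List.nodup_cons.mp hnd).2
    have hnotina : a.1 ∉ l.map Prod.fst := (List.nodup_cons.mp hnd).1
    rw [List.foldl_cons, ih _ hnd']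
    by_cases hk : a.1 + wt = s
    · -- this item hits the key; no later item can (fst-Nodup)
      have hfind : l.find? (fun sp => sp.1 + wt == s) = none := by
        rw [List.find?_eq_none]
        intro sp hsp
        simp only [beq_iff_eq]
        intro he
        exact hnotina (List.mem_map.mpr ⟨sp, hsp, by omega⟩)
      have hfind2 : List.find? (fun sp => sp.1 + wt == s) (a :: l) = some a := by
        simp [List.find?_cons, hk]
      rw [hfind, hfind2]
      show (match d.get? (a.1 + wt) with
            | none => d.insert (a.1 + wt) (a.2 * wt)
            | some t => if a.2 * wt < t then d.insert (a.1 + wt) (a.2 * wt) else d).get? s = _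
      rw [hk]
      rcases hdg : d.get? s with _ | t
      · simp only [hdg, omin]
        rw [← hk, PySem.Dict.get?_insert]
        simp
      · simp only [hdg, omin]
        by_cases hlt : a.2 * wt < t
        · rw [if_pos hlt, ← hk, PySem.Dict.get?_insert]
          simp
          omega
        · rw [if_neg hlt, hdg]
          congr 1
          omega
    · -- key missed: the state change at a.1+wt ≠ s is invisible at s
      have hskip : (match d.get? (a.1 + wt) with
            | none => d.insert (a.1 + wt) (a.2 * wt)
            | some t => if a.2 * wt < t then d.insert (a.1 + wt) (a.2 * wt) else d).get? s = d.get? s := by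
        rcases hdg : d.get? (a.1 + wt) with _ | t
        · simp only [hdg]
          rw [PySem.Dict.get?_insert, if_neg (fun h => hk h.symm)]
        · simp only [hdg]
          by_cases hlt : a.2 * wt < t
          · rw [if_pos hlt, PySem.Dict.get?_insert, if_neg (fun h => hk h.symm)]
          · rw [if_neg hlt]
      have hfindc : List.find? (fun sp => sp.1 + wt == s) (a :: l) = List.find? (fun sp => sp.1 + wt == s) l := by
        simp [List.find?_cons, hk]
      rw [hskip, hfindc]

theorem find?_of_mem_nodup (wt s p : Int) : ∀ l : List (Int × Int),
    (l.map Prod.fst).Nodup → (s - wt, p) ∈ l →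
    l.find? (fun sp => sp.1 + wt == s) = some (s - wt, p) := by
  intro l
  induction l with
  | nil => intro _ h; simp at h
  | cons a l ih =>
    intro hndf hmem
    rcases List.mem_cons.mp hmem with h | h
    · subst h
      simp [List.find?_cons, show (s - wt) + wt = s by ring]
    · have hfst : a.1 ≠ s - wt := by
        intro he
        exact (List.nodup_cons.mp hndf).1
          (List.mem_map.mpr ⟨(s - wt, p), h, by simp [he]⟩)
      have hfalse : (a.1 + wt == s) = false := by simp; omega
      rw [List.find?_cons, hfalse]
      exact ih (List.nodup_cons.mp hndf).2 h

theorem find?_items_of_get? (dp : PySem.Dict Int Int) (hnd : dp.keys.Nodup) (wt s : Int) :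
    dp.items.find? (fun sp => sp.1 + wt == s)
      = (dp.get? (s - wt)).map (fun p => (s - wt, p)) := by
  rcases hg : dp.get? (s - wt) with _ | p
  · simp only [Option.map_none]
    rw [List.find?_eq_none]
    intro sp hsp
    simp only [beq_iff_eq]
    intro he
    have h1 : sp.1 = s - wt := by omega
    have h2 := PySem.Dict.get?_of_mem_items (d := dp) (k := sp.1) (v := sp.2) hsp hnd
    rw [h1, hg] at h2
    simp at h2
  · simp only [Option.map_some]
    have hmem : (s - wt, p) ∈ dp.items := by
      apply PySem.Dict.mem_items_of_get?_eq_some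
      exact hg
    exact find?_of_mem_nodup wt s p dp.items hnd hmem

theorem stepB_get? (wt : Int) (dp d : PySem.Dict Int Int) (hnd : dp.keys.Nodup) (s : Int) :
    (stepB wt dp d).get? s = omin (d.get? s) ((dp.get? (s - wt)).map (fun p => p * wt)) := by
  show (dp.items.foldl _ d).get? s = _
  rw [foldB_upd_get? wt dp.items d hnd s, find?_items_of_get? dp hnd wt s]
  rcases dp.get? (s - wt) with _ | p
  · cases d.get? s <;> simp [omin]
  · simp

theorem stepB_nodup (wt : Int) (dp d : PySem.Dict Int Int) (hd : d.keys.Nodup) :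
    (stepB wt dp d).keys.Nodup := by
  show (dp.items.foldl _ d).keys.Nodup
  induction dp.items generalizing d with
  | nil => exact hd
  | cons a l ih =>
    rw [List.foldl_cons]
    apply ih
    rcases d.get? (a.1 + wt) with _ | t
    · exact PySem.Dict.nodup_keys_insert d _ _ hd
    · by_cases hlt : a.2 * wt < t
      · simpa [hlt] using PySem.Dict.nodup_keys_insert d (a.1 + wt) (a.2 * wt) hd
      · simpa [hlt] using hd

-- DP invariant: after processing weights whose reverse is rp, the dict for count c
-- is exactly `mp rp c` (as a lookup table), and its keys are distinct.
def InvB (k : Nat) (rp : List Int) (bs : List (PySem.Dict Int Int)) : Prop :=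
  bs.length = k + 1 ∧ ∀ c : Nat, c ≤ k →
    (bs.getD c PySem.Dict.empty).keys.Nodup ∧
    ∀ s : Int, (bs.getD c PySem.Dict.empty).get? s = mp rp c s

theorem pyRange_one_eq (k : Nat) :
    PySem.List.pyRange 1 ((k : Int) + 1) 1 = (List.range' 1 k).map (fun (c : Nat) => (c : Int)) := by
  induction k with
  | zero => decide
  | succ k ih =>
    push_cast
    rw [show (k : Int) + 1 + 1 = ((k : Int) + 1) + 1 by ring,
      PySem.List.pyRange_one_succ_right (by omega), List.range'_1_concat]
    push_cast at ih
    simp [ih]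
    omega

theorem stepW_eq (k : Nat) (wt : Int) (bs : List (PySem.Dict Int Int)) :
    stepW k wt bs = bs.getD 0 PySem.Dict.empty ::
      (List.range' 1 k).map (fun c => stepB wt (bs.getD (c - 1) PySem.Dict.empty) (bs.getD c PySem.Dict.empty)) := by
  show (PySem.List.pyRange 1 ((k : Int) + 1) 1).foldl _ _ = _
  rw [pyRange_one_eq, PySem.List.foldl_append_singleton_eq_map]
  have h0 : PySem.List.pyGetD bs (0 : Int) PySem.Dict.empty = bs.getD 0 PySem.Dict.empty := by
    exact_mod_cast PySem.List.pyGetD_natCast bs 0 PySem.Dict.empty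
  rw [List.map_map, List.singleton_append, h0]
  congr 1
  apply List.map_congr_left
  intro c hc
  have hc1 : 1 ≤ c := (List.mem_range'_1.mp hc).1
  have : ((c : Int) - 1) = ((c - 1 : Nat) : Int) := by omega
  simp only [Function.comp]
  rw [this, PySem.List.pyGetD_natCast, PySem.List.pyGetD_natCast]

theorem InvB_step (k : Nat) (wt : Int) (rp : List Int) (bs : List (PySem.Dict Int Int))
    (h : InvB k rp bs) : InvB k (wt :: rp) (stepW k wt bs) := by
  obtain ⟨hlen, hc⟩ := h
  rw [stepW_eq k wt bs]
  constructor
  · simp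
  · intro c hck
    match c with
    | 0 =>
      refine ⟨(hc 0 (Nat.zero_le k)).1, ?_⟩
      intro s
      rw [show mp (wt :: rp) 0 s = mp rp 0 s from rfl]
      exact (hc 0 (Nat.zero_le k)).2 s
    | Nat.succ c' =>
      have hc'k : c' + 1 ≤ k := hck
      have hgd : (bs.getD 0 PySem.Dict.empty ::
          (List.range' 1 k).map (fun c => stepB wt (bs.getD (c - 1) PySem.Dict.empty) (bs.getD c PySem.Dict.empty))).getD
            (c' + 1) PySem.Dict.empty
          = stepB wt (bs.getD c' PySem.Dict.empty) (bs.getD (c' + 1) PySem.Dict.empty) := by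
        have hci : c' < (List.range' 1 k).length := by simpa using hc'k
        rw [List.getD_cons_succ, List.getD_eq_getElem?_getD, List.getElem?_eq_getElem (by simpa using hc'k)]
        simp [Nat.add_comm]
      rw [hgd]
      refine ⟨stepB_nodup wt _ _ (hc (c' + 1) hc'k).1, ?_⟩
      intro s
      rw [stepB_get? wt _ _ (hc c' (by omega)).1 s,
        (hc (c' + 1) hc'k).2 s, (hc c' (by omega)).2 (s - wt)]
      rfl

theorem InvB_fold (k : Nat) : ∀ (ws : List Int) (rp : List Int) (bs : List (PySem.Dict Int Int)),
    InvB k rp bs → InvB k (ws.reverse ++ rp) (ws.foldl (fun b wt => stepW k wt b) bs) := by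
  intro ws
  induction ws with
  | nil => intro rp bs h; simpa using h
  | cons w ws ih =>
    intro rp bs h
    rw [List.foldl_cons]
    have := ih (w :: rp) (stepW k w bs) (InvB_step k w rp bs h)
    simpa using this

theorem InvB_init (k : Nat) :
    InvB k [] ((PySem.Dict.empty.insert 0 1) :: List.replicate k PySem.Dict.empty) := by
  constructor
  · simp
  · intro c hck
    match c with
    | 0 =>
      constructor
      · exact PySem.Dict.nodup_keys_insert _ _ _ PySem.Dict.nodup_keys_empty
      · intro s
        rw [List.getD_cons_zero, PySem.Dict.get?_insert]
        simp [mp, PySem.Dict.get?_empty]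
    | Nat.succ c' =>
      have : (List.replicate k (PySem.Dict.empty : PySem.Dict Int Int)).getD c' PySem.Dict.empty
          = PySem.Dict.empty := by
        rw [List.getD_eq_getElem?_getD]
        rcases Nat.lt_or_ge c' k with hlt | hge
        · simp [hlt]
        · have hlen' : (List.replicate k (PySem.Dict.empty : PySem.Dict Int Int)).length ≤ c' := by
            simpa using hge
          simp [List.getElem?_eq_none hlen']
      rw [List.getD_cons_succ, this]
      refine ⟨PySem.Dict.nodup_keys_empty, ?_⟩
      intro s
      simp [PySem.Dict.get?_empty, mp]

theorem quan_alt_eq_mix (avg : Int) (part2 : Bool) :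
    quan_alt avg part2 = mix (mp pvWeights.reverse (if part2 then 5 else 6) avg) 1000000000000 := by
  show (match (PySem.List.pyGetD
      (pvWeights.foldl (fun b wt => stepW (if part2 then 5 else 6) wt b)
        ((PySem.Dict.empty.insert 0 1) :: List.replicate (if part2 then 5 else 6) PySem.Dict.empty))
      ((if part2 then 5 else 6 : Nat) : Int) PySem.Dict.empty).get? avg with
    | some p => if p < 1000000000000 then p else 1000000000000
    | none => 1000000000000) = _
  set k : Nat := if part2 then 5 else 6 with hk
  have hinv := InvB_fold k pvWeights [] _ (InvB_init k)
  rw [List.append_nil] at hinv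
  obtain ⟨hlen, hc⟩ := hinv
  rw [PySem.List.pyGetD_natCast]
  rw [(hc k (le_refl k)).2 avg]
  rcases mp pvWeights.reverse k avg with _ | p <;> rfl

-- ===== VERDICT (by name: the statement is the Claim_ definition above) =====
theorem quan_spec : Claim_equal_quan := by
  intro avg part2 _
  show quan avg part2 = quan_alt avg part2
  rw [quan_eq_mix, quan_alt_eq_mix]
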